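-- pv_equiv track=rewrite | github.com/JoshuaShinkle/COS-120 | LABTESTS/LABTEST1/LT01.py | theWordBeforeEverything
-- ===== SOURCE A (Python) =====
-- def theWordBeforeEverything(string):
--     newString = ""
--     lastWasChar = False
--     for i in range(len(string)):
--         if lastWasChar == False and string[i] != " ":
--             newString += "The Word" + " "
--             newString += string[i]
--         else:
--             newString += string[i]
--
--         if i != len(string) - 1:
--             if string[i] == " " and string[i+1] != " ":
--                 lastWasChar = False
--             else:
--                 lastWasChar = True
--
--     return newString
-- ===== SOURCE B (Python) =====
-- def theWordBeforeEverything(string):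
--     return ' '.join(('The Word ' + t) if t else t for t in string.split(' '))
-- ===== Notes on version B (the rewrite author's own statement) =====
-- stated objective: idiomatic
-- what changed: A's per-index loop with a lastWasChar state machine and lookahead at the next character is replaced by the idiomatic split on the space character, map that prepends the fixed prefix to each nonempty token, and a single join.
import Mathlib
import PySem

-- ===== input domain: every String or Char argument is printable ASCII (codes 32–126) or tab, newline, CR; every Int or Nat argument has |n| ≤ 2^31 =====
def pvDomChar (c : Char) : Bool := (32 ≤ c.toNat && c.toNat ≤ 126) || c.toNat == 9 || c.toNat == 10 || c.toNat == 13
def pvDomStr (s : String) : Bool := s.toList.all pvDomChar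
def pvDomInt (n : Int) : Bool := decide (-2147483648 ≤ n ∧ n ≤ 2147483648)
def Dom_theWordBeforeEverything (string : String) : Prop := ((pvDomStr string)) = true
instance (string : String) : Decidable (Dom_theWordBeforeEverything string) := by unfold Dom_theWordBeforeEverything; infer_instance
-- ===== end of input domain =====

-- B replaces A's index loop with a character state machine by the idiomatic split-on-space / map / join (objective: idiomatic).

-- ===== PORT A =====
-- the for-loop over range(len(string)): structural recursion over the remaining
-- characters carrying the loop state (newString, lastWasChar); 'i != len(string)-1'
-- becomes 'the remaining tail is nonempty', and string[i+1] is the head of that tail.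
def theWordBeforeEverythingGoA : List Char → Bool → List Char → List Char
  | [], _, newString => newString
  | c :: rest, lastWasChar, newString =>
    let newString' :=
      if lastWasChar = false ∧ c ≠ ' ' then
        newString ++ ("The Word" ++ " ").toList ++ [c]
      else
        newString ++ [c]
    let lastWasChar' :=
      match rest with
      | [] => lastWasChar
      | d :: _ => if c = ' ' ∧ d ≠ ' ' then false else true
    theWordBeforeEverythingGoA rest lastWasChar' newString'

def theWordBeforeEverything (string : String) : String :=
  String.ofList (theWordBeforeEverythingGoA string.toList false [])

-- ===== PORT B =====
def theWordBeforeEverything_alt (string : String) : String :=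
  PySem.Str.join " "
    ((PySem.Chars.splitOn string.toList [' ']).map
      (fun t => if t = [] then String.ofList t else String.ofList ("The Word ".toList ++ t)))

-- ===== PRECONDITION & SPEC =====
def Spec_theWordBeforeEverything (string : String) (out : String) : Prop := out = theWordBeforeEverything_alt string
instance (string : String) (out : String) : Decidable (Spec_theWordBeforeEverything string out) := by unfold Spec_theWordBeforeEverything; infer_instance

-- ===== CLAIM (what is proved, stated in full; the proofs are below) =====
def Claim_equal_theWordBeforeEverything : Prop := ∀ (string : String), Dom_theWordBeforeEverything string → Spec_theWordBeforeEverything string (theWordBeforeEverything string)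

-- ===== LEMMAS AND PROOFS =====

-- proof-side spec of splitting on a single space
def pvSplit1 : List Char → List (List Char)
  | [] => [[]]
  | c :: r =>
    if c = ' ' then [] :: pvSplit1 r
    else
      match pvSplit1 r with
      | [] => [[c]]      -- unreachable: pvSplit1 is never []
      | h :: t => (c :: h) :: t

-- proof-side token transform (List Char level image of B's lambda)
def pvTok (t : List Char) : List Char :=
  if t = [] then t else "The Word ".toList ++ t

theorem pvSplit1_ne_nil (l : List Char) : pvSplit1 l ≠ [] := by
  cases l with
  | nil => simp [pvSplit1]
  | cons c r =>
    simp only [pvSplit1]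
    split_ifs
    · simp
    · cases h : pvSplit1 r <;> simp

theorem splitOn_go_space (fuel : Nat) :
    ∀ (l cur : List Char) (accr : List (List Char)), l.length < fuel →
    PySem.Chars.splitOn.go [' '] fuel l cur accr =
      accr.reverse ++
        (match pvSplit1 l with
         | [] => []
         | h :: t => (cur.reverse ++ h) :: t) := by
  induction fuel with
  | zero => intro l cur accr h; omega
  | succ n ih =>
    intro l cur accr h
    cases l with
    | nil =>
      simp [PySem.Chars.splitOn.go, pvSplit1]
    | cons c rest =>
      by_cases hc : c = ' '
      · subst hc
        rw [PySem.Chars.splitOn.go]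
        have hpre : [' '].isPrefixOf (' ' :: rest) = true := by simp [List.isPrefixOf]
        rw [if_pos hpre]
        simp only [List.length_cons, List.length_nil, List.drop_succ_cons, List.drop_zero]
        rw [ih rest [] (cur.reverse :: accr) (by simpa using Nat.lt_of_succ_lt_succ h)]
        rcases hsp : pvSplit1 rest with _ | ⟨hh, tt⟩
        · exact absurd hsp (pvSplit1_ne_nil rest)
        · simp [pvSplit1, hsp]
      · rw [PySem.Chars.splitOn.go]
        have hpre : [' '].isPrefixOf (c :: rest) = false := by
          simp [List.isPrefixOf]; exact fun h' => hc h'.symm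
        rw [if_neg (by simp [hpre])]
        rw [ih rest (c :: cur) accr (by simpa using Nat.lt_of_succ_lt_succ h)]
        rcases hsp : pvSplit1 rest with _ | ⟨hh, tt⟩
        · exact absurd hsp (pvSplit1_ne_nil rest)
        · simp [pvSplit1, hsp, hc]

theorem splitOn_space_eq (l : List Char) :
    PySem.Chars.splitOn l [' '] = pvSplit1 l := by
  rw [PySem.Chars.splitOn]
  rw [splitOn_go_space (l.length + 1) l [] [] (by omega)]
  rcases hsp : pvSplit1 l with _ | ⟨hh, tt⟩
  · exact absurd hsp (pvSplit1_ne_nil l)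
  · simp

theorem goA_acc (l : List Char) (b : Bool) (acc : List Char) :
    theWordBeforeEverythingGoA l b acc = acc ++ theWordBeforeEverythingGoA l b [] := by
  induction l generalizing b acc with
  | nil => simp [theWordBeforeEverythingGoA]
  | cons c rest ih =>
    simp only [theWordBeforeEverythingGoA]
    split_ifs <;> (conv_rhs => rw [ih]) <;> (conv_lhs => rw [ih]) <;>
      simp [List.append_assoc]

theorem join_cons_append (sep p q : List Char) (xs : List (List Char)) :
    PySem.Chars.join sep ((p ++ q) :: xs) = p ++ PySem.Chars.join sep (q :: xs) := by
  cases xs with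
  | nil => simp [PySem.Chars.join_singleton]
  | cons y ys =>
    rw [PySem.Chars.join_cons_cons, PySem.Chars.join_cons_cons]
    simp [List.append_assoc]

theorem goA_cons_space (rest : List Char) (b : Bool) :
    theWordBeforeEverythingGoA (' ' :: rest) b [] =
      ' ' :: theWordBeforeEverythingGoA rest
        (match rest with
         | [] => b
         | d :: _ => if d ≠ ' ' then false else true) [] := by
  simp only [theWordBeforeEverythingGoA]
  rw [if_neg (by simp)]
  rw [goA_acc]
  cases rest <;> simp

theorem goA_cons_nonspace (c : Char) (rest : List Char) (b : Bool) (hc : c ≠ ' ') :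
    theWordBeforeEverythingGoA (c :: rest) b [] =
      (if b = false then ("The Word" ++ " ").toList ++ [c] else [c]) ++
        theWordBeforeEverythingGoA rest
          (match rest with
           | [] => b
           | _ :: _ => true) [] := by
  simp only [theWordBeforeEverythingGoA]
  cases b with
  | false =>
    rw [if_pos ⟨rfl, hc⟩, goA_acc]
    simp only [List.nil_append]
    congr 1
    cases rest with
    | nil => rfl
    | cons d r' => simp [hc]
  | true =>
    rw [if_neg (by simp), goA_acc]
    simp only [List.nil_append]
    rw [if_neg (by simp)]
    congr 1
    cases rest with
    | nil => rfl
    | cons d r' => simp [hc]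

theorem goA_main (l : List Char) :
    theWordBeforeEverythingGoA l false [] =
      PySem.Chars.join [' '] ((pvSplit1 l).map pvTok) ∧
    theWordBeforeEverythingGoA l true [] =
      PySem.Chars.join [' ']
        ((pvSplit1 l).headI :: ((pvSplit1 l).tail.map pvTok)) := by
  induction l with
  | nil =>
    constructor <;>
      simp [theWordBeforeEverythingGoA, pvSplit1, pvTok, PySem.Chars.join_singleton]
  | cons c rest ih =>
    obtain ⟨ih1, ih2⟩ := ih
    by_cases hc : c = ' '
    · subst hc
      rw [goA_cons_space, goA_cons_space]
      cases rest with
      | nil =>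
        constructor <;>
          simp [theWordBeforeEverythingGoA, pvSplit1, pvTok,
            PySem.Chars.join_cons_cons, PySem.Chars.join_singleton]
      | cons d r' =>
        simp only []
        rcases hsp : pvSplit1 (d :: r') with _ | ⟨h, t⟩
        · exact absurd hsp (pvSplit1_ne_nil _)
        by_cases hd : d = ' '
        · subst hd
          rcases hsp' : pvSplit1 r' with _ | ⟨h', t'⟩
          · exact absurd hsp' (pvSplit1_ne_nil _)
          have hsplit : pvSplit1 (' ' :: r') = [] :: h' :: t' := by simp [pvSplit1, hsp']
          have hsplit2 : pvSplit1 (' ' :: ' ' :: r') = [] :: [] :: h' :: t' := by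
            simp [pvSplit1, hsp']
          rw [hsplit] at ih1 ih2
          rw [if_neg (by simp), hsplit2]
          constructor <;>
            simp [pvTok, PySem.Chars.join_cons_cons] at ih2 ⊢ <;> simp [ih2]
        · have hsplit2 : pvSplit1 (' ' :: d :: r') = [] :: h :: t := by
            rw [pvSplit1, if_pos rfl, hsp]
          rw [if_pos hd, hsplit2]
          rw [hsp] at ih1
          constructor <;>
            simp [pvTok, PySem.Chars.join_cons_cons, ih1]
    · rw [goA_cons_nonspace _ _ _ hc, goA_cons_nonspace _ _ _ hc]
      cases rest with
      | nil =>
        constructor <;>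
          simp [theWordBeforeEverythingGoA, pvSplit1, hc, pvTok,
            PySem.Chars.join_singleton]
      | cons d r' =>
        simp only []
        rcases hsp : pvSplit1 (d :: r') with _ | ⟨h, t⟩
        · exact absurd hsp (pvSplit1_ne_nil _)
        have hsplit : pvSplit1 (c :: d :: r') = (c :: h) :: t := by
          rw [pvSplit1, if_neg hc, hsp]
        rw [hsp] at ih2
        simp only [List.headI, List.tail] at ih2
        rw [hsplit]
        constructor
        · rw [if_pos trivial]
          have hTok : pvTok (c :: h) = (("The Word" ++ " ").toList ++ [c]) ++ h := by
            simp [pvTok]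
          simp only [List.map_cons, hTok, join_cons_append]
          simp [ih2]
        · rw [if_neg (by simp)]
          simp only [List.headI, List.tail]
          rw [show ((c :: h : List Char)) = [c] ++ h from rfl, join_cons_append]
          simp [ih2]

-- ===== VERDICT (by name: the statement is the Claim_ definition above) =====
theorem theWordBeforeEverything_spec : Claim_equal_theWordBeforeEverything := by
  intro s _
  unfold Spec_theWordBeforeEverything theWordBeforeEverything theWordBeforeEverything_alt
    PySem.Str.join
  rw [(goA_main s.toList).1, splitOn_space_eq]
  congr 1
  rw [show (" ".toList : List Char) = [' '] from rfl]
  congr 1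
  rw [List.map_map]
  refine List.map_congr_left ?_
  intro t _
  by_cases ht : t = [] <;> simp [ht, pvTok]
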